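-- pv_equiv track=rewrite | github.com/Dominic946/Advent-of-Code | 2023/src/day13.py | find_h
-- ===== SOURCE A (Python) =====
-- def find_h(board):
--     for c in range(1,len(board)):
--         good = True
--         for x in range(c):
--             try:
--                 if board[c-x-1] != board[c+x]:
--                     good = False
--                     break
--             except:
--                 break
--         if good:
--             return c
--     return 0
-- ===== SOURCE B (Python) =====
-- def find_h(board):
--     # Z-algorithm approach: a mirror line after row c means the 2k rows around it
--     # (k = min(c, n-c)) form an even palindrome anchored at the top edge (c <= n-c)
--     # or the bottom edge (c > n-c).  Anchored even palindromes of board are exactly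
--     # full-length prefix matches between board and its reversal, which two linear
--     # Z-function passes over board+sep+reversed(board) (and the swap) deliver, so the
--     # final scan is O(1) per candidate.
--     n = len(board)
--     if n < 2:
--         return 0
--
--     def zfunc(t):
--         m = len(t)
--         z = [0] * m
--         z[0] = m
--         l = r = 0
--         for i in range(1, m):
--             zi = min(r - i, z[i - l]) if i < r else 0
--             while i + zi < m and t[zi] == t[i + zi]:
--                 zi += 1
--             z[i] = zi
--             if i + zi > r:
--                 l, r = i, i + zi
--         return z
--
--     sep = object()          # matches no row
--     rev = board[::-1]
--     z1 = zfunc(list(board) + [sep] + rev)   # z1[n+1+j] = lcp(board, rev[j:])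
--     z2 = zfunc(rev + [sep] + list(board))   # z2[n+1+j] = lcp(rev, board[j:])
--     for c in range(1, n):
--         k = min(c, n - c)
--         if c <= n - c:
--             # board[0:2c] must be a palindrome <=> rev[n-2c:] is a prefix of board
--             if z1[(n + 1) + (n - 2 * k)] == 2 * k:
--                 return c
--         else:
--             # board[n-2k:] must be a palindrome <=> board[n-2k:] is a prefix of rev
--             if z2[(n + 1) + (n - 2 * k)] == 2 * k:
--                 return c
--     return 0
-- ===== Notes on version B (the rewrite author's own statement) =====
-- stated objective: alternative
-- what changed: Replaces A's per-candidate symmetric rescan (for each cut c, re-compare up to min(c,n-c) row pairs) by two Z-function passes over board + sentinel + reversed(board); each candidate cut is then decided by a single precomputed z-array lookup, since a mirror at c is exactly an edge-anchored even palindrome, i.e. a full-length match between board and a suffix of its reversal.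
import Mathlib
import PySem

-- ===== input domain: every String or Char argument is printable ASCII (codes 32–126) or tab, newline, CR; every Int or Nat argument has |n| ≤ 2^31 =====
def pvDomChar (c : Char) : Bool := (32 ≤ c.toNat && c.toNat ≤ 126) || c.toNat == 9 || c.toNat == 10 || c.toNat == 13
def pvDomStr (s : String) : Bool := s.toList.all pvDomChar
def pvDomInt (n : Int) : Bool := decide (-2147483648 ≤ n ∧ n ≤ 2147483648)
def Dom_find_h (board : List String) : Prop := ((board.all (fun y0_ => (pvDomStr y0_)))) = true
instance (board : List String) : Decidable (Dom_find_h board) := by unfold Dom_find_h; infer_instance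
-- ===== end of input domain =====

-- B (different algorithm): two Z-function passes over board ++ [sentinel] ++ reversed board
-- precompute every edge-anchored even-palindrome length, so each candidate mirror line is
-- decided by one z-array lookup instead of A's per-candidate symmetric rescan.


-- ===== PORT A =====
-- inner loop: 'for x in range(c)' with try/except around the indexing; 'break' with good
-- still True is modelled by returning true, 'good = False; break' by returning false.
def find_h_inner (board : List String) (c x : Nat) : Bool :=
  if _hx : x < c then
    match PySem.List.pyGet? board ((c : Int) - (x : Int) - 1), PySem.List.pyGet? board ((c : Int) + (x : Int)) with
    | some l, some r => if l ≠ r then false else find_h_inner board c (x + 1)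
    | _, _ => true          -- IndexError: 'except: break', good stays True
  else true
termination_by c - x

-- outer loop: 'for c in range(1, len(board))' with early return
def find_h_outer (board : List String) (c : Nat) : Int :=
  if _hc : c < board.length then
    if find_h_inner board c 0 then (c : Int) else find_h_outer board (c + 1)
  else 0
termination_by board.length - c

def find_h (board : List String) : Int := find_h_outer board 1

-- ===== PORT B =====
-- Rows are modelled as `some row`, the Python sentinel `object()` (equal to no row) as `none`.
-- zExt is the 'while i + zi < m and t[zi] == t[i + zi]: zi += 1' loop of zfunc.
def zExt (t : List (Option String)) (i zi : Nat) : Nat :=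
  if h : i + zi < t.length ∧ t[zi]? = t[i + zi]? then zExt t i (zi + 1) else zi
termination_by t.length - (i + zi)
decreasing_by obtain ⟨h1, -⟩ := h; omega

-- the 'for i in range(1, m)' loop of zfunc, carrying (z, l, r)
def zLoop (t : List (Option String)) (z : Array Nat) (l r i : Nat) : Array Nat :=
  if _h : i < t.length then
    let zi0 := if i < r then min (r - i) (z.getD (i - l) 0) else 0
    let zi := zExt t i zi0
    let z' := z.setIfInBounds i zi
    if i + zi > r then zLoop t z' i (i + zi) (i + 1) else zLoop t z' l r (i + 1)
  else z
termination_by t.length - i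

-- z = [0]*m; z[0] = m; l = r = 0; then the loop (indices are always in bounds)
def zfunc (t : List (Option String)) : Array Nat :=
  zLoop t ((Array.replicate t.length 0).setIfInBounds 0 t.length) 0 0 1

-- 'for c in range(1, n)' over the two precomputed z arrays
def altScan (n : Nat) (z1 z2 : Array Nat) (c : Nat) : Int :=
  if _hc : c < n then
    let k := min c (n - c)
    if c ≤ n - c then
      if z1.getD (n + 1 + (n - 2 * k)) 0 = 2 * k then (c : Int) else altScan n z1 z2 (c + 1)
    else
      if z2.getD (n + 1 + (n - 2 * k)) 0 = 2 * k then (c : Int) else altScan n z1 z2 (c + 1)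
  else 0
termination_by n - c

def find_h_alt (board : List String) : Int :=
  let n := board.length
  if n < 2 then 0
  else
    let s := board.map some
    let rev := board.reverse.map some      -- board[::-1]
    let z1 := zfunc (s ++ [none] ++ rev)   -- list(board) + [sep] + rev
    let z2 := zfunc (rev ++ [none] ++ s)   -- rev + [sep] + list(board)
    altScan n z1 z2 1

-- ===== PRECONDITION & SPEC =====
def Spec_find_h (board : List String) (out : Int) : Prop := out = find_h_alt board
instance (board : List String) (out : Int) : Decidable (Spec_find_h board out) := by unfold Spec_find_h; infer_instance

-- ===== CLAIM (what is proved, stated in full; the proofs are below) =====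
def Claim_equal_find_h : Prop := ∀ (board : List String), Dom_find_h board → Spec_find_h board (find_h board)

-- ===== LEMMAS AND PROOFS =====

-- longest common prefix of two lists: the value Python's z-function entries denote
def pvLcp {α : Type} [DecidableEq α] : List α → List α → Nat
  | x :: xs, y :: ys => if x = y then pvLcp xs ys + 1 else 0
  | _, _ => 0

theorem pvLcp_le_left {α : Type} [DecidableEq α] : ∀ (a b : List α), pvLcp a b ≤ a.length := by
  intro a
  induction a with
  | nil => intro b; cases b <;> simp [pvLcp]
  | cons x xs ih =>
    intro b
    cases b with
    | nil => simp [pvLcp]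
    | cons y ys =>
      simp only [pvLcp, List.length_cons]
      split_ifs
      · have := ih ys; omega
      · omega

theorem pvLcp_le_right {α : Type} [DecidableEq α] : ∀ (a b : List α), pvLcp a b ≤ b.length := by
  intro a
  induction a with
  | nil => intro b; cases b <;> simp [pvLcp]
  | cons x xs ih =>
    intro b
    cases b with
    | nil => simp [pvLcp]
    | cons y ys =>
      simp only [pvLcp, List.length_cons]
      split_ifs
      · have := ih ys; omega
      · omega

theorem pvLcp_get? {α : Type} [DecidableEq α] :
    ∀ (a b : List α) (x : Nat), x < pvLcp a b →
      x < a.length ∧ x < b.length ∧ a[x]? = b[x]? := by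
  intro a
  induction a with
  | nil => intro b x hx; cases b <;> simp [pvLcp] at hx
  | cons z zs ih =>
    intro b x hx
    cases b with
    | nil => simp [pvLcp] at hx
    | cons y ys =>
      simp only [pvLcp] at hx
      split_ifs at hx with heq
      · cases x with
        | zero => exact ⟨by simp, by simp, by simp [heq]⟩
        | succ x =>
          obtain ⟨h1, h2, h3⟩ := ih ys x (by omega)
          exact ⟨by simpa using h1, by simpa using h2, by simpa using h3⟩
      · omega

theorem pvLcp_mismatch {α : Type} [DecidableEq α] :
    ∀ (a b : List α), pvLcp a b < a.length → pvLcp a b < b.length →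
      a[pvLcp a b]? ≠ b[pvLcp a b]? := by
  intro a
  induction a with
  | nil => intro b h1 _; simp at h1
  | cons z zs ih =>
    intro b h1 h2
    cases b with
    | nil => simp at h2
    | cons y ys =>
      by_cases heq : z = y
      · have hv : pvLcp (z :: zs) (y :: ys) = pvLcp zs ys + 1 := by simp [pvLcp, heq]
        rw [hv] at h1 h2 ⊢
        simpa using ih ys (by simpa using h1) (by simpa using h2)
      · have hv : pvLcp (z :: zs) (y :: ys) = 0 := by simp [pvLcp, heq]
        rw [hv]
        simp [heq]

theorem le_pvLcp {α : Type} [DecidableEq α] :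
    ∀ (a b : List α) (k : Nat),
      (∀ x, x < k → x < a.length ∧ x < b.length ∧ a[x]? = b[x]?) → k ≤ pvLcp a b := by
  intro a
  induction a with
  | nil =>
    intro b k h
    cases k with
    | zero => omega
    | succ k => have := (h 0 (by omega)).1; simp at this
  | cons z zs ih =>
    intro b k h
    cases b with
    | nil =>
      cases k with
      | zero => omega
      | succ k => have := (h 0 (by omega)).2.1; simp at this
    | cons y ys =>
      cases k with
      | zero => omega
      | succ k =>
        have h0 := (h 0 (by omega)).2.2
        simp at h0
        have hrec : k ≤ pvLcp zs ys := by
          apply ih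
          intro x hx
          obtain ⟨h1, h2, h3⟩ := h (x + 1) (by omega)
          exact ⟨by simpa using h1, by simpa using h2, by simpa using h3⟩
        simp [pvLcp, h0]
        omega

theorem pvLcp_eq_min_iff {α : Type} [DecidableEq α] (a b : List α) :
    pvLcp a b = min a.length b.length ↔
      (∀ x, x < min a.length b.length → a[x]? = b[x]?) := by
  constructor
  · intro h x hx
    exact (pvLcp_get? a b x (by omega)).2.2
  · intro h
    have h1 : pvLcp a b ≤ min a.length b.length :=
      le_min (pvLcp_le_left a b) (pvLcp_le_right a b)
    have h2 : min a.length b.length ≤ pvLcp a b := by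
      apply le_pvLcp
      intro x hx
      exact ⟨by omega, by omega, h x hx⟩
    omega

-- what z[j] must be: lcp of t with its suffix starting at j
def zspec (t : List (Option String)) (j : Nat) : Nat := pvLcp t (t.drop j)

theorem zspec_le (t : List (Option String)) (j : Nat) : zspec t j ≤ t.length - j := by
  have := pvLcp_le_right t (t.drop j)
  simpa [zspec] using this

-- at zi = zspec the while condition fails
theorem zExt_stop (t : List (Option String)) (i : Nat) :
    ¬ (i + zspec t i < t.length ∧ t[zspec t i]? = t[i + zspec t i]?) := by
  rintro ⟨h1, h2⟩
  have hb1 : zspec t i < t.length := by omega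
  have hb2 : zspec t i < (t.drop i).length := by simp; omega
  have hm := pvLcp_mismatch t (t.drop i) (by simpa [zspec] using hb1) (by simpa [zspec] using hb2)
  rw [List.getElem?_drop] at hm
  exact hm h2

-- the while loop computes the lcp as soon as it starts at a correct partial match
theorem zExt_eq_fuel (t : List (Option String)) (i : Nat) :
    ∀ (fuel zi : Nat), zspec t i - zi ≤ fuel → zi ≤ zspec t i → zExt t i zi = zspec t i := by
  intro fuel
  induction fuel with
  | zero =>
    intro zi hf hle
    have hz : zi = zspec t i := by omega
    rw [hz, zExt, dif_neg (zExt_stop t i)]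
  | succ fuel ih =>
    intro zi hf hle
    by_cases hlt : zi < zspec t i
    · obtain ⟨hb1, hb2, he⟩ := pvLcp_get? t (t.drop i) zi hlt
      have hib : i + zi < t.length := by simp at hb2; omega
      have heq : t[zi]? = t[i + zi]? := by rw [he, List.getElem?_drop]
      rw [zExt, dif_pos ⟨hib, heq⟩]
      exact ih (zi + 1) (by omega) (by omega)
    · have hz : zi = zspec t i := by omega
      rw [hz, zExt, dif_neg (zExt_stop t i)]

theorem zExt_eq (t : List (Option String)) (i zi : Nat) (h : zi ≤ zspec t i) :
    zExt t i zi = zspec t i :=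
  zExt_eq_fuel t i (zspec t i - zi) zi (by omega) h

theorem getD_setIfInBounds_ne (z : Array Nat) (i j v : Nat) (h : i ≠ j) :
    (z.setIfInBounds i v).getD j 0 = z.getD j 0 := by
  rw [Array.getD_eq_getD_getElem?, Array.getD_eq_getD_getElem?,
    Array.getElem?_setIfInBounds_ne h]

theorem getD_setIfInBounds_self (z : Array Nat) (i v : Nat) (h : i < z.size) :
    (z.setIfInBounds i v).getD i 0 = v := by
  rw [Array.getD_eq_getD_getElem?, Array.getElem?_setIfInBounds_self_of_lt h]
  rfl

-- step equation of the z loop with the lets expanded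
theorem zLoop_step (t : List (Option String)) (z : Array Nat) (l r i : Nat)
    (h : i < t.length) :
    zLoop t z l r i =
      (if i + zExt t i (if i < r then min (r - i) (z.getD (i - l) 0) else 0) > r then
        zLoop t (z.setIfInBounds i (zExt t i (if i < r then min (r - i) (z.getD (i - l) 0) else 0)))
          i (i + zExt t i (if i < r then min (r - i) (z.getD (i - l) 0) else 0)) (i + 1)
      else
        zLoop t (z.setIfInBounds i (zExt t i (if i < r then min (r - i) (z.getD (i - l) 0) else 0)))
          l r (i + 1)) := by
  rw [zLoop, dif_pos h]

-- main invariant of the z loop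
theorem zLoop_correct (t : List (Option String)) :
    ∀ (fuel : Nat) (z : Array Nat) (l r i : Nat),
      t.length - i ≤ fuel → 1 ≤ i → z.size = t.length →
      (∀ j, 1 ≤ j → j < i → z.getD j 0 = zspec t j) →
      l < i → r ≤ l + zspec t l → (l = 0 → r = 0) →
      ∀ j, 1 ≤ j → j < t.length → (zLoop t z l r i).getD j 0 = zspec t j := by
  intro fuel
  induction fuel with
  | zero =>
    intro z l r i hf h1 hsz hz hl hr hl0 j hj1 hj2
    rw [zLoop, dif_neg (by omega)]
    exact hz j hj1 (by omega)
  | succ fuel ih =>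
    intro z l r i hf h1 hsz hz hl hr hl0 j hj1 hj2
    by_cases hi : i < t.length
    · -- the starting value zi0 never exceeds the true z value
      have h0 : (if i < r then min (r - i) (z.getD (i - l) 0) else 0) ≤ zspec t i := by
        split_ifs with hir
        · have hl1 : 1 ≤ l := by
            by_contra hcon
            have : l = 0 := by omega
            have := hl0 this
            omega
          have hq : z.getD (i - l) 0 = zspec t (i - l) := hz (i - l) (by omega) (by omega)
          rw [hq]
          apply le_pvLcp
          intro x hx
          have hx1 : x < r - i := by omega
          have hx2 : x < zspec t (i - l) := by omega
          obtain ⟨hb1, hb2, he1⟩ := pvLcp_get? t (t.drop (i - l)) x hx2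
          have he1' : t[x]? = t[(i - l) + x]? := by rw [he1, List.getElem?_drop]
          have hx'2 : (i - l) + x < zspec t l := by omega
          obtain ⟨hc1, hc2, he2⟩ := pvLcp_get? t (t.drop l) ((i - l) + x) hx'2
          have he2' : t[(i - l) + x]? = t[l + ((i - l) + x)]? := by rw [he2, List.getElem?_drop]
          have hidx : l + ((i - l) + x) = i + x := by omega
          rw [hidx] at he2'
          have hrlen : r ≤ t.length := by
            have := zspec_le t l
            omega
          refine ⟨by omega, ?_, ?_⟩
          · simp
            omega
          · rw [List.getElem?_drop]
            rw [he1', he2']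
        · omega
      rw [zLoop_step t z l r i hi]
      set w := zExt t i (if i < r then min (r - i) (z.getD (i - l) 0) else 0) with hwdef
      have hzi : w = zspec t i := zExt_eq t i _ h0
      have hznew : ∀ j, 1 ≤ j → j < i + 1 →
          (z.setIfInBounds i w).getD j 0 = zspec t j := by
        intro j hj1' hj2'
        by_cases hji : j = i
        · subst hji
          rw [getD_setIfInBounds_self _ _ _ (by omega), hzi]
        · rw [getD_setIfInBounds_ne _ _ _ _ (by omega)]
          exact hz j hj1' (by omega)
      have hsz' : (z.setIfInBounds i w).size = t.length := by
        rw [Array.size_setIfInBounds]; exact hsz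
      by_cases hbr : i + w > r
      · rw [if_pos hbr]
        exact ih _ i _ (i + 1) (by omega) (by omega) hsz' hznew (by omega)
          (by omega) (by omega) j hj1 hj2
      · rw [if_neg hbr]
        exact ih _ l r (i + 1) (by omega) (by omega) hsz' hznew (by omega) hr hl0 j hj1 hj2
    · rw [zLoop, dif_neg hi]
      exact hz j hj1 (by omega)

theorem zfunc_correct (t : List (Option String)) (j : Nat) (hj1 : 1 ≤ j) (hj2 : j < t.length) :
    (zfunc t).getD j 0 = zspec t j := by
  unfold zfunc
  apply zLoop_correct t t.length _ 0 0 1 (by omega) (by omega)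
    (by rw [Array.size_setIfInBounds, Array.size_replicate])
    (by intro j h1 h2; omega) (by omega) (by omega) (by omega) j hj1 hj2

-- ---------- A's inner loop as an all-of-zip (carried over from the literal port) ----------

theorem find_h_inner_eq_all (board : List String) (c : Nat) (hc : c ≤ board.length)
    (x : Nat) :
    find_h_inner board c x
      = ((((board.take c).reverse).drop x).zip ((board.drop c).drop x)).all
          (fun p => p.1 == p.2) := by
  have hLlen : ((board.take c).reverse).length = c := by
    simp; omega
  have key : ∀ k x, c - x ≤ k →
      find_h_inner board c x
        = ((((board.take c).reverse).drop x).zip ((board.drop c).drop x)).all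
            (fun p => p.1 == p.2) := by
    intro k
    induction k with
    | zero =>
      intro x hx
      have hge : c ≤ x := by omega
      unfold find_h_inner
      rw [dif_neg (by omega)]
      rw [List.drop_eq_nil_of_le (by omega : ((board.take c).reverse).length ≤ x)]
      simp
    | succ k ih =>
      intro x hx
      by_cases hxc : x < c
      · unfold find_h_inner
        rw [dif_pos hxc]
        have hcast1 : ((c : Int) - (x : Int) - 1) = ((c - 1 - x : Nat) : Int) := by omega
        have hlt1 : c - 1 - x < board.length := by omega
        have h1 : PySem.List.pyGet? board ((c : Int) - (x : Int) - 1)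
            = some board[c - 1 - x] := by
          rw [hcast1, PySem.List.pyGet?_natCast, List.getElem?_eq_getElem hlt1]
        have hcast2 : ((c : Int) + (x : Int)) = ((c + x : Nat) : Int) := by omega
        by_cases hin : c + x < board.length
        · have h2 : PySem.List.pyGet? board ((c : Int) + (x : Int))
              = some board[c + x] := by
            rw [hcast2, PySem.List.pyGet?_natCast, List.getElem?_eq_getElem hin]
          rw [h1, h2]
          have hxL : x < ((board.take c).reverse).length := by omega
          have hxR : x < (board.drop c).length := by simp; omega
          have hdL : ((board.take c).reverse).drop x
              = board[c - 1 - x] :: ((board.take c).reverse).drop (x + 1) := by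
            rw [List.drop_eq_getElem_cons hxL]
            congr 1
            rw [List.getElem_reverse]
            rw [List.getElem_take]
            congr 1
            simp
            omega
          have hdR : (board.drop c).drop x
              = board[c + x] :: (board.drop c).drop (x + 1) := by
            rw [List.drop_eq_getElem_cons hxR]
            congr 1
            rw [List.getElem_drop]
          have hred : (match (some board[c - 1 - x] : Option String),
                (some board[c + x] : Option String) with
              | some l, some r => if l ≠ r then false else find_h_inner board c (x + 1)
              | _, _ => true)
              = if board[c - 1 - x] ≠ board[c + x] then false
                else find_h_inner board c (x + 1) := rfl
          rw [hred, hdL, hdR, List.zip_cons_cons, List.all_cons]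
          by_cases heq : board[c - 1 - x] = board[c + x]
          · rw [if_neg (by simp [heq]), ih (x + 1) (by omega), heq]
            simp
          · rw [if_pos (by simp [heq])]
            simp [heq]
        · have h2 : PySem.List.pyGet? board ((c : Int) + (x : Int)) = none := by
            rw [hcast2, PySem.List.pyGet?_natCast, List.getElem?_eq_none (by omega)]
          have hnilR : (board.drop c).drop x = [] :=
            List.drop_eq_nil_of_le (by simp; omega)
          rw [h1, h2, hnilR, List.zip_nil_right]
          rfl
      · unfold find_h_inner
        rw [dif_neg hxc]
        rw [List.drop_eq_nil_of_le (by omega : ((board.take c).reverse).length ≤ x)]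
        simp
  exact key (c - x) x le_rfl

-- all-of-zip equality is exactly 'lcp = min of the lengths'
theorem all_zip_iff_pvLcp {α : Type} [DecidableEq α] :
    ∀ (a b : List α),
      (((a.zip b).all (fun p => p.1 == p.2)) = true ↔ pvLcp a b = min a.length b.length) := by
  intro a
  induction a with
  | nil => intro b; cases b <;> simp [pvLcp]
  | cons x xs ih =>
    intro b
    cases b with
    | nil => simp [pvLcp]
    | cons y ys =>
      simp only [List.zip_cons_cons, List.all_cons, Bool.and_eq_true, beq_iff_eq,
        List.length_cons, pvLcp]
      constructor
      · rintro ⟨hxy, hall⟩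
        rw [if_pos hxy, (ih ys).mp hall]
        omega
      · intro h
        split_ifs at h with hxy
        · exact ⟨hxy, (ih ys).mpr (by omega)⟩
        · have h1 := pvLcp_le_left xs ys
          omega

theorem map_some_inj (x y : Option String) : x.map some = y.map some ↔ x = y := by
  cases x <;> cases y <;> simp

-- A's test at cut c, in pointwise form
theorem condA_iff (board : List String) (c : Nat) (h1 : 1 ≤ c) (h2 : c < board.length) :
    (find_h_inner board c 0 = true)
      ↔ (∀ x, x < min c (board.length - c) → board[c - 1 - x]? = board[c + x]?) := by
  rw [find_h_inner_eq_all board c (by omega) 0]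
  simp only [List.drop_zero]
  rw [all_zip_iff_pvLcp]
  have hlr : ((board.take c).reverse).length = c := by simp; omega
  have hld : (board.drop c).length = board.length - c := by simp
  rw [pvLcp_eq_min_iff, hlr, hld]
  have hts : (board.take c).length = c := by simp; omega
  constructor
  · intro h x hx
    have := h x hx
    rw [List.getElem?_reverse (by rw [hts]; omega : x < (board.take c).length)] at this
    rw [List.length_take] at this
    have he : min c board.length - 1 - x = c - 1 - x := by
      have : c ≤ board.length := by omega
      omega
    rw [he] at this
    rw [List.getElem?_take_of_lt (by omega : c - 1 - x < c)] at this
    rw [List.getElem?_drop] at this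
    exact this
  · intro h x hx
    rw [List.getElem?_reverse (by rw [hts]; omega : x < (board.take c).length)]
    rw [List.length_take]
    have he : min c board.length - 1 - x = c - 1 - x := by
      have : c ≤ board.length := by omega
      omega
    rw [he]
    rw [List.getElem?_take_of_lt (by omega : c - 1 - x < c)]
    rw [List.getElem?_drop]
    exact h x hx

-- ---------- the two z-array tests, in pointwise form ----------

theorem len_T (x : Option String) (u v : List String) :
    (u.map some ++ [x] ++ v.map some).length = u.length + v.length + 1 := by
  simp; omega

theorem getT_left (u v : List String) (x : Option String) (i : Nat) (h : i < u.length) :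
    (u.map some ++ [x] ++ v.map some)[i]? = (u[i]?).map some := by
  rw [List.append_assoc]
  rw [List.getElem?_append_left (by simp; omega)]
  exact List.getElem?_map
theorem getT_right (u v : List String) (x : Option String) (i : Nat) :
    (u.map some ++ [x] ++ v.map some)[u.length + 1 + i]? = (v[i]?).map some := by
  rw [List.append_assoc]
  rw [List.getElem?_append_right (by simp; omega)]
  have e : u.length + 1 + i - (u.map some).length = i + 1 := by
    rw [List.length_map]; omega
  rw [e, List.singleton_append, List.getElem?_cons_succ]
  exact List.getElem?_map

theorem condB1_iff (board : List String) (c : Nat) (h1 : 1 ≤ c) (h2 : 2 * c ≤ board.length) :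
    ((zfunc (board.map some ++ [none] ++ board.reverse.map some)).getD
        (board.length + 1 + (board.length - 2 * c)) 0 = 2 * c)
      ↔ (∀ x, x < 2 * c → board[x]? = board[2 * c - 1 - x]?) := by
  have hlt : (board.map some ++ [none] ++ board.reverse.map some).length
      = 2 * board.length + 1 := by
    rw [len_T]; simp; omega
  have hidx : board.length + 1 + (board.length - 2 * c)
      < (board.map some ++ [none] ++ board.reverse.map some).length := by omega
  rw [zfunc_correct (board.map some ++ [none] ++ board.reverse.map some)
    (board.length + 1 + (board.length - 2 * c)) (by omega) hidx]
  unfold zspec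
  have hmin : min (board.map some ++ [none] ++ board.reverse.map some).length
      ((board.map some ++ [none] ++ board.reverse.map some).drop
        (board.length + 1 + (board.length - 2 * c))).length = 2 * c := by
    simp only [List.length_drop, hlt]; omega
  have hstep : ∀ x, x < 2 * c →
      ((board.map some ++ [none] ++ board.reverse.map some)[x]?
          = ((board.map some ++ [none] ++ board.reverse.map some).drop
              (board.length + 1 + (board.length - 2 * c)))[x]?
        ↔ board[x]? = board[2 * c - 1 - x]?) := by
    intro x hx
    rw [List.getElem?_drop]
    have e2 : board.length + 1 + (board.length - 2 * c) + x
        = board.length + 1 + ((board.length - 2 * c) + x) := by omega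
    rw [e2]
    rw [getT_left board (board.reverse) none x (by omega)]
    rw [getT_right board (board.reverse) none ((board.length - 2 * c) + x)]
    rw [List.getElem?_reverse (by omega : (board.length - 2 * c) + x < board.length)]
    have e3 : board.length - 1 - ((board.length - 2 * c) + x) = 2 * c - 1 - x := by omega
    rw [e3]
    exact map_some_inj _ _
  constructor
  · intro h x hx
    exact (hstep x hx).mp ((pvLcp_eq_min_iff _ _).mp (h.trans hmin.symm) x (by omega))
  · intro h
    refine ((pvLcp_eq_min_iff _ _).mpr ?_).trans hmin
    intro x hx
    rw [hmin] at hx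
    exact (hstep x hx).mpr (h x hx)

theorem condB2_iff (board : List String) (k : Nat) (h1 : 1 ≤ k) (h2 : 2 * k < board.length) :
    ((zfunc (board.reverse.map some ++ [none] ++ board.map some)).getD
        (board.length + 1 + (board.length - 2 * k)) 0 = 2 * k)
      ↔ (∀ x, x < 2 * k →
          board[board.length - 1 - x]? = board[board.length - 2 * k + x]?) := by
  have hrl : board.reverse.length = board.length := by simp
  have hlt : (board.reverse.map some ++ [none] ++ board.map some).length
      = 2 * board.length + 1 := by
    rw [len_T]; simp; omega
  have hidx : board.length + 1 + (board.length - 2 * k)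
      < (board.reverse.map some ++ [none] ++ board.map some).length := by omega
  rw [zfunc_correct (board.reverse.map some ++ [none] ++ board.map some)
    (board.length + 1 + (board.length - 2 * k)) (by omega) hidx]
  unfold zspec
  have hmin : min (board.reverse.map some ++ [none] ++ board.map some).length
      ((board.reverse.map some ++ [none] ++ board.map some).drop
        (board.length + 1 + (board.length - 2 * k))).length = 2 * k := by
    simp only [List.length_drop, hlt]; omega
  have hstep : ∀ x, x < 2 * k →
      ((board.reverse.map some ++ [none] ++ board.map some)[x]?
          = ((board.reverse.map some ++ [none] ++ board.map some).drop
              (board.length + 1 + (board.length - 2 * k)))[x]?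
        ↔ board[board.length - 1 - x]? = board[board.length - 2 * k + x]?) := by
    intro x hx
    rw [List.getElem?_drop]
    have e2 : board.length + 1 + (board.length - 2 * k) + x
        = board.length + 1 + ((board.length - 2 * k) + x) := by omega
    rw [e2]
    rw [getT_left (board.reverse) board none x (by rw [hrl]; omega)]
    have hTr := getT_right (board.reverse) board none ((board.length - 2 * k) + x)
    rw [hrl] at hTr
    rw [hTr]
    rw [List.getElem?_reverse (by omega : x < board.length)]
    exact map_some_inj _ _
  constructor
  · intro h x hx
    exact (hstep x hx).mp ((pvLcp_eq_min_iff _ _).mp (h.trans hmin.symm) x (by omega))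
  · intro h
    refine ((pvLcp_eq_min_iff _ _).mpr ?_).trans hmin
    intro x hx
    rw [hmin] at hx
    exact (hstep x hx).mpr (h x hx)

-- ---------- the index games: edge-anchored even palindromes vs symmetric pairs ----------

theorem pal_prefix_iff (board : List String) (c : Nat) (h1 : 1 ≤ c) (h2 : 2 * c ≤ board.length) :
    (∀ x, x < 2 * c → board[x]? = board[2 * c - 1 - x]?)
      ↔ (∀ x, x < c → board[c - 1 - x]? = board[c + x]?) := by
  constructor
  · intro h x hx
    have := h (c - 1 - x) (by omega)
    have e : 2 * c - 1 - (c - 1 - x) = c + x := by omega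
    rw [e] at this
    exact this
  · intro h x hx
    by_cases hxc : x < c
    · have := h (c - 1 - x) (by omega)
      have e1 : c - 1 - (c - 1 - x) = x := by omega
      have e2 : c + (c - 1 - x) = 2 * c - 1 - x := by omega
      rw [e1, e2] at this
      exact this
    · have := h (x - c) (by omega)
      have e1 : c - 1 - (x - c) = 2 * c - 1 - x := by omega
      have e2 : c + (x - c) = x := by omega
      rw [e1, e2] at this
      exact this.symm

theorem pal_suffix_iff (board : List String) (c : Nat) (hk : board.length - c < c)
    (hc : c < board.length) :
    (∀ x, x < 2 * (board.length - c) →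
        board[board.length - 1 - x]? = board[board.length - 2 * (board.length - c) + x]?)
      ↔ (∀ x, x < board.length - c → board[c - 1 - x]? = board[c + x]?) := by
  set n := board.length with hn
  set k := n - c with hkdef
  have hck : c = n - k := by omega
  constructor
  · intro h x hx
    have := h (k - 1 - x) (by omega)
    have e1 : n - 1 - (k - 1 - x) = c + x := by omega
    have e2 : n - 2 * k + (k - 1 - x) = c - 1 - x := by omega
    rw [e1, e2] at this
    exact this.symm
  · intro h x hx
    by_cases hxk : x < k
    · have := h (k - 1 - x) (by omega)
      have e1 : c - 1 - (k - 1 - x) = n - 2 * k + x := by omega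
      have e2 : c + (k - 1 - x) = n - 1 - x := by omega
      rw [e1, e2] at this
      exact this.symm
    · have := h (x - k) (by omega)
      have e1 : c - 1 - (x - k) = n - 1 - x := by omega
      have e2 : c + (x - k) = n - 2 * k + x := by omega
      rw [e1, e2] at this
      exact this

-- step equations for the two scans
theorem find_h_outer_step (board : List String) (c : Nat) (h : c < board.length) :
    find_h_outer board c
      = if find_h_inner board c 0 then (c : Int) else find_h_outer board (c + 1) := by
  rw [find_h_outer, dif_pos h]

theorem altScan_step (n : Nat) (z1 z2 : Array Nat) (c : Nat) (h : c < n) :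
    altScan n z1 z2 c
      = if c ≤ n - c then
          (if z1.getD (n + 1 + (n - 2 * min c (n - c))) 0 = 2 * min c (n - c) then (c : Int)
           else altScan n z1 z2 (c + 1))
        else
          (if z2.getD (n + 1 + (n - 2 * min c (n - c))) 0 = 2 * min c (n - c) then (c : Int)
           else altScan n z1 z2 (c + 1)) := by
  rw [altScan, dif_pos h]

theorem scan_eq (board : List String) :
    ∀ (fuel c : Nat), board.length - c ≤ fuel → 1 ≤ c →
      find_h_outer board c
        = altScan board.length
            (zfunc (board.map some ++ [none] ++ board.reverse.map some))
            (zfunc (board.reverse.map some ++ [none] ++ board.map some)) c := by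
  intro fuel
  induction fuel with
  | zero =>
    intro c hf h1
    rw [find_h_outer, dif_neg (by omega), altScan, dif_neg (by omega)]
  | succ fuel ih =>
    intro c hf h1
    by_cases hc : c < board.length
    · rw [find_h_outer_step board c hc, altScan_step _ _ _ c hc]
      set n := board.length with hn
      by_cases hle : c ≤ n - c
      · have hmin : min c (n - c) = c := by omega
        rw [if_pos hle, hmin]
        have hiff : (find_h_inner board c 0 = true)
            ↔ ((zfunc (board.map some ++ [none] ++ board.reverse.map some)).getD
                (n + 1 + (n - 2 * c)) 0 = 2 * c) := by
          rw [condA_iff board c h1 hc, condB1_iff board c h1 (by omega), pal_prefix_iff board c h1 (by omega)]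
          rw [hmin]
        by_cases hcond : (zfunc (board.map some ++ [none] ++ board.reverse.map some)).getD
            (n + 1 + (n - 2 * c)) 0 = 2 * c
        · rw [if_pos hcond, if_pos (hiff.mpr hcond)]
        · rw [if_neg hcond, if_neg (by
            intro habs
            exact hcond (hiff.mp habs))]
          exact ih (c + 1) (by omega) (by omega)
      · have hmin : min c (n - c) = n - c := by omega
        rw [if_neg hle, hmin]
        have hiff : (find_h_inner board c 0 = true)
            ↔ ((zfunc (board.reverse.map some ++ [none] ++ board.map some)).getD
                (n + 1 + (n - 2 * (n - c))) 0 = 2 * (n - c)) := by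
          rw [condA_iff board c h1 hc, condB2_iff board (n - c) (by omega) (by omega),
            pal_suffix_iff board c (by omega) hc]
          rw [hmin]
        by_cases hcond : (zfunc (board.reverse.map some ++ [none] ++ board.map some)).getD
            (n + 1 + (n - 2 * (n - c))) 0 = 2 * (n - c)
        · rw [if_pos hcond, if_pos (hiff.mpr hcond)]
        · rw [if_neg hcond, if_neg (by
            intro habs
            exact hcond (hiff.mp habs))]
          exact ih (c + 1) (by omega) (by omega)
    · rw [find_h_outer, dif_neg (by omega), altScan, dif_neg (by omega)]

-- ===== VERDICT (by name: the statement is the Claim_ definition above) =====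
theorem find_h_spec : Claim_equal_find_h := by
  intro board _
  unfold Spec_find_h find_h find_h_alt
  by_cases hn : board.length < 2
  · rw [if_pos hn, find_h_outer, dif_neg (by omega)]
  · rw [if_neg hn]
    exact scan_eq board board.length 1 (by omega) (by omega)
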